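-- pv_equiv track=rewrite | github.com/JoaoAreias/Youtube | codeforces/MaratonaMineira2022/D/D.py | fill_prefix_sum
-- ===== SOURCE A (Python) =====
-- def fill_prefix_sum(country: list[list[int]], t: int) -> list[list[int]]:
--     n, m = len(country), len(country[0])
--     prefix_sum = [[0 for _ in range(m)] for _ in range(n)]
--
--     prefix_sum[0][0] = int(country[0][0] <= t)
--
--     for i in range(1, n):
--         prefix_sum[i][0] = prefix_sum[i-1][0] + int(country[i][0] <= t)
--
--     for j in range(1, m):
--         prefix_sum[0][j] = prefix_sum[0][j-1] + int(country[0][j] <= t)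
--
--     for i in range(1, n):
--         for j in range(1, m):
--             prefix_sum[i][j] = int(country[i][j] <= t) + \
--                                 prefix_sum[i-1][j] + \
--                                 prefix_sum[i][j-1] - \
--                                 prefix_sum[i-1][j-1]
--     return prefix_sum
-- ===== SOURCE B (Python) =====
-- def _scan(xs):
--     out = []
--     s = 0
--     for x in xs:
--         s += x
--         out.append(s)
--     return out
--
--
-- def fill_prefix_sum(country: list[list[int]], t: int) -> list[list[int]]:
--     # Two separable sweeps: horizontal running sums per row, then a vertical
--     # accumulation row by row.
--     n, m = len(country), len(country[0])
--     rows = [_scan(int(x <= t) for x in row[:m]) for row in country]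
--     out = []
--     prev = [0] * m
--     for row in rows:
--         prev = [a + b for a, b in zip(prev, row)]
--         out.append(prev)
--     return out
-- ===== Notes on version B (the rewrite author's own statement) =====
-- stated objective: alternative
-- what changed: Replaces the inclusion-exclusion recurrence with its three boundary loops by two separable directional sweeps: a running-sum scan along each row followed by a row-by-row vertical accumulation.
import Mathlib
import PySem

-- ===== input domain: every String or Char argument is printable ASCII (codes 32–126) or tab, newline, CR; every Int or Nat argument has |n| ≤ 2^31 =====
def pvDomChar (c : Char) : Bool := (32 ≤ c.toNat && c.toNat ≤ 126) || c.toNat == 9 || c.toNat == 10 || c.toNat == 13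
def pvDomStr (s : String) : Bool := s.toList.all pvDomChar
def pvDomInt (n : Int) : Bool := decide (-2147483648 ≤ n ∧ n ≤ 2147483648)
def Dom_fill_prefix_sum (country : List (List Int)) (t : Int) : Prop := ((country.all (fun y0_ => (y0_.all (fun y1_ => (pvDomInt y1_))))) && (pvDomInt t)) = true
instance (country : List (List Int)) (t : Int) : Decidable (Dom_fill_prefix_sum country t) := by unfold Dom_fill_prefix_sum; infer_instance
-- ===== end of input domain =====

-- B replaces A's inclusion-exclusion recurrence (three boundary loops) by two
-- separable directional sweeps (row-wise running sums, then vertical accumulation);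
-- same O(n*m) cost, different decomposition.


-- ===== PORT A =====
-- 2D read `p[i][j]` / write `p[i][j] = v`; on the admitted inputs every index
-- used is nonnegative and in range, so the `getD`/`set` defaults never fire.
def pvGetD2 (p : List (List Int)) (i j : Nat) : Int := (p.getD i []).getD j 0

def pvSet2 (p : List (List Int)) (i j : Nat) (v : Int) : List (List Int) :=
  p.set i ((p.getD i []).set j v)

-- `int(country[i][j] <= t)`
def pvInd (country : List (List Int)) (t : Int) (i j : Nat) : Int :=
  if pvGetD2 country i j ≤ t then 1 else 0

def fill_prefix_sum (country : List (List Int)) (t : Int) : List (List Int) :=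
  let n := country.length
  let m := (country.headD []).length
  let ps0 := List.replicate n (List.replicate m (0 : Int))
  let ps1 := pvSet2 ps0 0 0 (pvInd country t 0 0)
  let ps2 := (List.range' 1 (n - 1)).foldl
      (fun ps i => pvSet2 ps i 0 (pvGetD2 ps (i - 1) 0 + pvInd country t i 0)) ps1
  let ps3 := (List.range' 1 (m - 1)).foldl
      (fun ps j => pvSet2 ps 0 j (pvGetD2 ps 0 (j - 1) + pvInd country t 0 j)) ps2
  (List.range' 1 (n - 1)).foldl
      (fun ps i => (List.range' 1 (m - 1)).foldl
        (fun ps j => pvSet2 ps i j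
          (pvInd country t i j + pvGetD2 ps (i - 1) j + pvGetD2 ps i (j - 1)
            - pvGetD2 ps (i - 1) (j - 1))) ps) ps3

-- ===== PORT B =====
-- `_scan`: running sums of a list (the explicit accumulator loop of Source B).
def pvScan : List Int → Int → List Int
  | [], _ => []
  | x :: xs, s => (s + x) :: pvScan xs (s + x)

def fill_prefix_sum_alt (country : List (List Int)) (t : Int) : List (List Int) :=
  let m := (country.headD []).length
  -- `row[:m]` with 0 ≤ m is `List.take m`
  let rows := country.map (fun row =>
    pvScan ((row.take m).map (fun x => if x ≤ t then (1 : Int) else 0)) 0)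
  (rows.foldl
    (fun (acc : List (List Int) × List Int) row =>
      let prev := List.zipWith (· + ·) acc.2 row
      (acc.1 ++ [prev], prev))
    (([] : List (List Int)), List.replicate m (0 : Int))).1

-- ===== PRECONDITION & SPEC =====
-- Pre excludes exactly the inputs where A raises IndexError: the empty grid,
-- an empty first row (m = 0), and ragged grids with some row shorter than the first.
def Pre_fill_prefix_sum (country : List (List Int)) (t : Int) : Prop :=
  country ≠ [] ∧ 0 < (country.headD []).length ∧
    ∀ row ∈ country, (country.headD []).length ≤ row.length
instance (country : List (List Int)) (t : Int) : Decidable (Pre_fill_prefix_sum country t) := by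
  unfold Pre_fill_prefix_sum; infer_instance

def pvWitness_fill_prefix_sum : List (List Int) × Int := ([[1, 2], [3, 4]], 2)

def Spec_fill_prefix_sum (country : List (List Int)) (t : Int) (out : List (List Int)) : Prop := out = fill_prefix_sum_alt country t
instance (country : List (List Int)) (t : Int) (out : List (List Int)) : Decidable (Spec_fill_prefix_sum country t out) := by unfold Spec_fill_prefix_sum; infer_instance

-- ===== CLAIM (what is proved, stated in full; the proofs are below) =====
def Claim_equal_fill_prefix_sum : Prop := ∀ (country : List (List Int)) (t : Int), Dom_fill_prefix_sum country t → Pre_fill_prefix_sum country t → Spec_fill_prefix_sum country t (fill_prefix_sum country t)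

-- ===== LEMMAS AND PROOFS =====

-- The 2D prefix sum both programs compute.
def pvS (c : List (List Int)) (t : Int) (i j : Nat) : Int :=
  ∑ a ∈ Finset.range (i + 1), ∑ b ∈ Finset.range (j + 1), pvInd c t a b

-- a table has n rows, each of length m
def pvShape (p : List (List Int)) (n m : Nat) : Prop :=
  p.length = n ∧ ∀ a < n, (p.getD a []).length = m

-- Basic lemmas about the 2D read/write primitives -----------------------------

lemma getD_set_self {α : Type} [Inhabited α] (l : List α) (i : Nat) (v d : α) (h : i < l.length) :
    (l.set i v).getD i d = v := by
  simp [List.getD, h]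

lemma getD_set_ne {α : Type} [Inhabited α] (l : List α) (i j : Nat) (v d : α) (h : i ≠ j) :
    (l.set i v).getD j d = l.getD j d := by
  simp [List.getD, List.getElem?_set_ne h]

lemma get2_set2_self (p : List (List Int)) (i j : Nat) (v : Int)
    (hi : i < p.length) (hj : j < (p.getD i []).length) :
    pvGetD2 (pvSet2 p i j v) i j = v := by
  unfold pvGetD2 pvSet2
  rw [getD_set_self _ _ _ _ hi, getD_set_self _ _ _ _ (by simpa using hj)]

lemma get2_set2_ne (p : List (List Int)) (i j a b : Nat) (v : Int)
    (h : i ≠ a ∨ j ≠ b) :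
    pvGetD2 (pvSet2 p i j v) a b = pvGetD2 p a b := by
  unfold pvGetD2 pvSet2
  by_cases hia : i = a
  · subst hia
    rcases h with h | h
    · exact absurd rfl h
    · by_cases hlen : i < p.length
      · rw [getD_set_self _ _ _ _ hlen, getD_set_ne _ _ _ _ _ h]
      · rw [List.set_eq_of_length_le (by omega)]
  · rw [getD_set_ne _ _ _ _ _ hia]

lemma shape_set2 (p : List (List Int)) (n m i j : Nat) (v : Int) (h : pvShape p n m) :
    pvShape (pvSet2 p i j v) n m := by
  obtain ⟨h1, h2⟩ := h
  refine ⟨by simp [pvSet2, h1], fun a ha => ?_⟩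
  by_cases hia : i = a
  · subst hia
    by_cases hlen : i < p.length
    · rw [pvSet2, getD_set_self _ _ _ _ hlen, List.length_set]
      exact h2 i ha
    · rw [pvSet2, List.set_eq_of_length_le (by omega)]
      exact h2 i ha
  · rw [pvSet2, getD_set_ne _ _ _ _ _ hia]; exact h2 a ha

-- Algebraic facts about pvS ----------------------------------------------------

lemma pvS_zero_zero (c : List (List Int)) (t : Int) : pvS c t 0 0 = pvInd c t 0 0 := by
  simp [pvS]

lemma pvS_col (c : List (List Int)) (t : Int) (i : Nat) :
    pvS c t (i + 1) 0 = pvS c t i 0 + pvInd c t (i + 1) 0 := by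
  simp [pvS, Finset.sum_range_succ]

lemma pvS_row (c : List (List Int)) (t : Int) (j : Nat) :
    pvS c t 0 (j + 1) = pvS c t 0 j + pvInd c t 0 (j + 1) := by
  simp [pvS, Finset.sum_range_succ]

lemma pvS_rec (c : List (List Int)) (t : Int) (i j : Nat) :
    pvS c t (i + 1) (j + 1) =
      pvInd c t (i + 1) (j + 1) + pvS c t i (j + 1) + pvS c t (i + 1) j - pvS c t i j := by
  simp [pvS, Finset.sum_range_succ]
  ring

-- Stage-by-stage characterisation of port A -----------------------------------

def pvPs1 (c : List (List Int)) (t : Int) : List (List Int) :=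
  pvSet2 (List.replicate c.length (List.replicate (c.headD []).length (0 : Int))) 0 0
    (pvInd c t 0 0)

def pvPs2 (c : List (List Int)) (t : Int) : List (List Int) :=
  (List.range' 1 (c.length - 1)).foldl
    (fun ps i => pvSet2 ps i 0 (pvGetD2 ps (i - 1) 0 + pvInd c t i 0)) (pvPs1 c t)

def pvPs3 (c : List (List Int)) (t : Int) : List (List Int) :=
  (List.range' 1 ((c.headD []).length - 1)).foldl
    (fun ps j => pvSet2 ps 0 j (pvGetD2 ps 0 (j - 1) + pvInd c t 0 j)) (pvPs2 c t)

lemma fill_eq_stages (c : List (List Int)) (t : Int) :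
    fill_prefix_sum c t =
      (List.range' 1 (c.length - 1)).foldl
        (fun ps i => (List.range' 1 ((c.headD []).length - 1)).foldl
          (fun ps j => pvSet2 ps i j
            (pvInd c t i j + pvGetD2 ps (i - 1) j + pvGetD2 ps i (j - 1)
              - pvGetD2 ps (i - 1) (j - 1))) ps) (pvPs3 c t) := rfl

lemma get_ps0 (n m i j : Nat) :
    pvGetD2 (List.replicate n (List.replicate m (0 : Int))) i j = 0 := by
  unfold pvGetD2
  by_cases hi : i < n <;> by_cases hj : j < m <;>
    simp [List.getD, hi, hj]

lemma shape_ps0 (n m : Nat) : pvShape (List.replicate n (List.replicate m (0 : Int))) n m := by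
  refine ⟨by simp, fun a ha => ?_⟩
  simp [List.getD, ha]

lemma shape_ps1 (c : List (List Int)) (t : Int) :
    pvShape (pvPs1 c t) c.length (c.headD []).length :=
  shape_set2 _ _ _ _ _ _ (shape_ps0 _ _)

lemma char_ps1 (c : List (List Int)) (t : Int)
    (hn : 0 < c.length) (hm : 0 < (c.headD []).length) (i j : Nat) :
    pvGetD2 (pvPs1 c t) i j = if i = 0 ∧ j = 0 then pvS c t 0 0 else 0 := by
  unfold pvPs1
  by_cases h : i = 0 ∧ j = 0
  · obtain ⟨hi, hj⟩ := h; subst hi; subst hj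
    rw [if_pos ⟨rfl, rfl⟩, get2_set2_self, pvS_zero_zero]
    · simpa using hn
    · have := (shape_ps0 c.length (c.headD []).length).2 0 hn
      omega
  · rw [if_neg h, get2_set2_ne _ _ _ _ _ _ (by omega), get_ps0]

lemma char_ps2_aux (c : List (List Int)) (t : Int)
    (hn : 0 < c.length) (hm : 0 < (c.headD []).length) (k : Nat) (hk : k ≤ c.length - 1) :
    pvShape ((List.range' 1 k).foldl
        (fun ps i => pvSet2 ps i 0 (pvGetD2 ps (i - 1) 0 + pvInd c t i 0)) (pvPs1 c t))
        c.length (c.headD []).length ∧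
    ∀ i j, pvGetD2 ((List.range' 1 k).foldl
        (fun ps i => pvSet2 ps i 0 (pvGetD2 ps (i - 1) 0 + pvInd c t i 0)) (pvPs1 c t)) i j =
      if j = 0 ∧ i ≤ k then pvS c t i 0 else 0 := by
  induction k with
  | zero =>
    refine ⟨shape_ps1 c t, fun i j => ?_⟩
    rw [List.range', List.foldl_nil, char_ps1 c t hn hm]
    by_cases h : j = 0 ∧ i ≤ 0
    · rw [if_pos h, if_pos (by omega), (by omega : i = 0)]
    · rw [if_neg h, if_neg (by omega)]
  | succ k ih =>
    obtain ⟨ihS, ihC⟩ := ih (by omega)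
    rw [List.range'_concat, List.foldl_append, List.foldl_cons, List.foldl_nil]
    simp only [one_mul]
    have hlen : 1 + k < (((List.range' 1 k).foldl
        (fun ps i => pvSet2 ps i 0 (pvGetD2 ps (i - 1) 0 + pvInd c t i 0)) (pvPs1 c t))).length := by
      rw [ihS.1]; omega
    have hrow : 0 < (((List.range' 1 k).foldl
        (fun ps i => pvSet2 ps i 0 (pvGetD2 ps (i - 1) 0 + pvInd c t i 0)) (pvPs1 c t)).getD (1 + k) []).length := by
      rw [ihS.2 (1 + k) (by omega)]; omega
    refine ⟨shape_set2 _ _ _ _ _ _ ihS, fun i j => ?_⟩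
    by_cases h : i = 1 + k ∧ j = 0
    · obtain ⟨hi, hj⟩ := h; subst hi; subst hj
      rw [if_pos ⟨rfl, by omega⟩, get2_set2_self _ _ _ _ hlen hrow]
      rw [(by omega : 1 + k - 1 = k), ihC k 0, if_pos ⟨rfl, le_rfl⟩,
        (by omega : 1 + k = k + 1), pvS_col]
    · rw [get2_set2_ne _ _ _ _ _ _ (by omega), ihC i j]
      by_cases hj0 : j = 0 ∧ i ≤ k
      · rw [if_pos hj0, if_pos ⟨hj0.1, by omega⟩]
      · rw [if_neg hj0, if_neg (by omega)]

lemma char_ps2 (c : List (List Int)) (t : Int)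
    (hn : 0 < c.length) (hm : 0 < (c.headD []).length) :
    pvShape (pvPs2 c t) c.length (c.headD []).length ∧
    ∀ i j, pvGetD2 (pvPs2 c t) i j =
      if j = 0 ∧ i < c.length then pvS c t i 0 else 0 := by
  obtain ⟨hS, hC⟩ := char_ps2_aux c t hn hm (c.length - 1) le_rfl
  refine ⟨hS, fun i j => ?_⟩
  rw [pvPs2, hC i j]
  by_cases h : j = 0 ∧ i ≤ c.length - 1
  · rw [if_pos h, if_pos ⟨h.1, by omega⟩]
  · rw [if_neg h, if_neg (by omega)]

lemma char_ps3_aux (c : List (List Int)) (t : Int)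
    (hn : 0 < c.length) (hm : 0 < (c.headD []).length) (k : Nat)
    (hk : k ≤ (c.headD []).length - 1) :
    pvShape ((List.range' 1 k).foldl
        (fun ps j => pvSet2 ps 0 j (pvGetD2 ps 0 (j - 1) + pvInd c t 0 j)) (pvPs2 c t))
        c.length (c.headD []).length ∧
    ∀ i j, pvGetD2 ((List.range' 1 k).foldl
        (fun ps j => pvSet2 ps 0 j (pvGetD2 ps 0 (j - 1) + pvInd c t 0 j)) (pvPs2 c t)) i j =
      if j = 0 ∧ i < c.length then pvS c t i 0
      else if i = 0 ∧ 1 ≤ j ∧ j ≤ k then pvS c t 0 j else 0 := by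
  induction k with
  | zero =>
    refine ⟨(char_ps2 c t hn hm).1, fun i j => ?_⟩
    rw [List.range', List.foldl_nil, (char_ps2 c t hn hm).2 i j]
    by_cases h : j = 0 ∧ i < c.length
    · rw [if_pos h, if_pos h]
    · rw [if_neg h, if_neg h, if_neg (by omega)]
  | succ k ih =>
    obtain ⟨ihS, ihC⟩ := ih (by omega)
    rw [List.range'_concat, List.foldl_append, List.foldl_cons, List.foldl_nil]
    simp only [one_mul]
    have hlen : 0 < (((List.range' 1 k).foldl
        (fun ps j => pvSet2 ps 0 j (pvGetD2 ps 0 (j - 1) + pvInd c t 0 j)) (pvPs2 c t))).length := by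
      rw [ihS.1]; omega
    have hrow : 1 + k < (((List.range' 1 k).foldl
        (fun ps j => pvSet2 ps 0 j (pvGetD2 ps 0 (j - 1) + pvInd c t 0 j)) (pvPs2 c t)).getD 0 []).length := by
      rw [ihS.2 0 hn]; omega
    refine ⟨shape_set2 _ _ _ _ _ _ ihS, fun i j => ?_⟩
    by_cases h : i = 0 ∧ j = 1 + k
    · obtain ⟨hi, hj⟩ := h; subst hi; subst hj
      rw [get2_set2_self _ _ _ _ hlen hrow]
      rw [(by omega : 1 + k - 1 = k), ihC 0 k]
      have hval : (if k = 0 ∧ (0:Nat) < c.length then pvS c t 0 0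
          else if (0:Nat) = 0 ∧ 1 ≤ k ∧ k ≤ k then pvS c t 0 k else 0) = pvS c t 0 k := by
        by_cases hk0 : k = 0
        · subst hk0; rw [if_pos ⟨rfl, hn⟩]
        · rw [if_neg (by omega), if_pos ⟨rfl, by omega, le_rfl⟩]
      rw [hval, (by omega : 1 + k = k + 1), pvS_row]
      rw [if_neg (by omega), if_pos ⟨rfl, by omega, le_rfl⟩]
    · rw [get2_set2_ne _ _ _ _ _ _ (by omega), ihC i j]
      by_cases h1 : j = 0 ∧ i < c.length
      · rw [if_pos h1, if_pos h1]
      · rw [if_neg h1, if_neg h1]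
        by_cases h2 : i = 0 ∧ 1 ≤ j ∧ j ≤ k
        · rw [if_pos h2, if_pos ⟨h2.1, h2.2.1, by omega⟩]
        · rw [if_neg h2, if_neg (by omega)]

lemma char_ps3 (c : List (List Int)) (t : Int)
    (hn : 0 < c.length) (hm : 0 < (c.headD []).length) :
    pvShape (pvPs3 c t) c.length (c.headD []).length ∧
    ∀ i j, pvGetD2 (pvPs3 c t) i j =
      if j = 0 ∧ i < c.length then pvS c t i 0
      else if i = 0 ∧ 1 ≤ j ∧ j < (c.headD []).length then pvS c t 0 j else 0 := by
  obtain ⟨hS, hC⟩ := char_ps3_aux c t hn hm ((c.headD []).length - 1) le_rfl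
  refine ⟨hS, fun i j => ?_⟩
  rw [pvPs3, hC i j]
  by_cases h1 : j = 0 ∧ i < c.length
  · rw [if_pos h1, if_pos h1]
  · rw [if_neg h1, if_neg h1]
    by_cases h2 : i = 0 ∧ 1 ≤ j ∧ j ≤ (c.headD []).length - 1
    · rw [if_pos h2, if_pos ⟨h2.1, h2.2.1, by omega⟩]
    · rw [if_neg h2, if_neg (by omega)]

-- the inner loop of the main double loop, for a fixed row i
lemma char_inner (c : List (List Int)) (t : Int) (i : Nat)
    (_hn : 0 < c.length) (hm : 0 < (c.headD []).length)
    (hi1 : 1 ≤ i) (hin : i < c.length)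
    (P : List (List Int))
    (hS : pvShape P c.length (c.headD []).length)
    (H1 : ∀ b < (c.headD []).length, pvGetD2 P (i - 1) b = pvS c t (i - 1) b)
    (H0 : pvGetD2 P i 0 = pvS c t i 0) :
    ∀ k, k ≤ (c.headD []).length - 1 →
    pvShape ((List.range' 1 k).foldl
        (fun ps j => pvSet2 ps i j
          (pvInd c t i j + pvGetD2 ps (i - 1) j + pvGetD2 ps i (j - 1)
            - pvGetD2 ps (i - 1) (j - 1))) P) c.length (c.headD []).length ∧
    ∀ a b, pvGetD2 ((List.range' 1 k).foldl
        (fun ps j => pvSet2 ps i j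
          (pvInd c t i j + pvGetD2 ps (i - 1) j + pvGetD2 ps i (j - 1)
            - pvGetD2 ps (i - 1) (j - 1))) P) a b =
      if a = i ∧ 1 ≤ b ∧ b ≤ k then pvS c t i b else pvGetD2 P a b := by
  intro k
  induction k with
  | zero =>
    intro _
    refine ⟨hS, fun a b => ?_⟩
    rw [List.range', List.foldl_nil, if_neg (by omega)]
  | succ k ih =>
    intro hk
    obtain ⟨ihS, ihC⟩ := ih (by omega)
    rw [List.range'_concat, List.foldl_append, List.foldl_cons, List.foldl_nil]
    simp only [one_mul]
    have hlen : i < (((List.range' 1 k).foldl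
        (fun ps j => pvSet2 ps i j
          (pvInd c t i j + pvGetD2 ps (i - 1) j + pvGetD2 ps i (j - 1)
            - pvGetD2 ps (i - 1) (j - 1))) P)).length := by
      rw [ihS.1]; omega
    have hrow : 1 + k < (((List.range' 1 k).foldl
        (fun ps j => pvSet2 ps i j
          (pvInd c t i j + pvGetD2 ps (i - 1) j + pvGetD2 ps i (j - 1)
            - pvGetD2 ps (i - 1) (j - 1))) P).getD i []).length := by
      rw [ihS.2 i hin]; omega
    refine ⟨shape_set2 _ _ _ _ _ _ ihS, fun a b => ?_⟩
    have key : pvS c t i (1 + k) =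
        pvInd c t i (1 + k) + pvS c t (i - 1) (1 + k) + pvS c t i k - pvS c t (i - 1) k := by
      obtain ⟨i0, rfl⟩ : ∃ i0, i = i0 + 1 := ⟨i - 1, by omega⟩
      rw [(by omega : 1 + k = k + 1), (by omega : i0 + 1 - 1 = i0), pvS_rec]
    by_cases h : a = i ∧ b = 1 + k
    · obtain ⟨ha, hb⟩ := h; subst ha; subst hb
      rw [get2_set2_self _ _ _ _ hlen hrow]
      rw [(by omega : 1 + k - 1 = k)]
      rw [if_pos ⟨rfl, by omega, by omega⟩]
      rw [ihC (a - 1) (1 + k), if_neg (by omega), H1 (1 + k) (by omega)]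
      rw [ihC (a - 1) k, if_neg (by omega), H1 k (by omega)]
      by_cases hk0 : k = 0
      · subst hk0
        rw [ihC a 0, if_neg (by omega), H0, key]
      · rw [ihC a k, if_pos ⟨rfl, by omega, le_rfl⟩, key]
    · rw [get2_set2_ne _ _ _ _ _ _ (by omega), ihC a b]
      by_cases h1 : a = i ∧ 1 ≤ b ∧ b ≤ k
      · rw [if_pos h1, if_pos ⟨h1.1, h1.2.1, by omega⟩]
      · rw [if_neg h1, if_neg (by omega)]

-- the outer loop of the main double loop
lemma char_outer (c : List (List Int)) (t : Int)
    (hn : 0 < c.length) (hm : 0 < (c.headD []).length) (k : Nat) (hk : k ≤ c.length - 1) :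
    pvShape ((List.range' 1 k).foldl
        (fun ps i => (List.range' 1 ((c.headD []).length - 1)).foldl
          (fun ps j => pvSet2 ps i j
            (pvInd c t i j + pvGetD2 ps (i - 1) j + pvGetD2 ps i (j - 1)
              - pvGetD2 ps (i - 1) (j - 1))) ps) (pvPs3 c t)) c.length (c.headD []).length ∧
    ∀ a b, pvGetD2 ((List.range' 1 k).foldl
        (fun ps i => (List.range' 1 ((c.headD []).length - 1)).foldl
          (fun ps j => pvSet2 ps i j
            (pvInd c t i j + pvGetD2 ps (i - 1) j + pvGetD2 ps i (j - 1)
              - pvGetD2 ps (i - 1) (j - 1))) ps) (pvPs3 c t)) a b =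
      if 1 ≤ a ∧ a ≤ k ∧ 1 ≤ b ∧ b < (c.headD []).length then pvS c t a b
      else pvGetD2 (pvPs3 c t) a b := by
  induction k with
  | zero =>
    refine ⟨(char_ps3 c t hn hm).1, fun a b => ?_⟩
    rw [List.range', List.foldl_nil, if_neg (by omega)]
  | succ k ih =>
    obtain ⟨ihS, ihC⟩ := ih (by omega)
    rw [List.range'_concat, List.foldl_append, List.foldl_cons, List.foldl_nil]
    simp only [one_mul]
    have hC3 := (char_ps3 c t hn hm).2
    have H1 : ∀ b < (c.headD []).length,
        pvGetD2 ((List.range' 1 k).foldl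
          (fun ps i => (List.range' 1 ((c.headD []).length - 1)).foldl
            (fun ps j => pvSet2 ps i j
              (pvInd c t i j + pvGetD2 ps (i - 1) j + pvGetD2 ps i (j - 1)
                - pvGetD2 ps (i - 1) (j - 1))) ps) (pvPs3 c t)) (1 + k - 1) b =
          pvS c t (1 + k - 1) b := by
      intro b hb
      rw [(by omega : 1 + k - 1 = k), ihC k b]
      by_cases hk0 : k = 0
      · subst hk0
        rw [if_neg (by omega), hC3 0 b]
        by_cases hb0 : b = 0
        · subst hb0; rw [if_pos ⟨rfl, hn⟩]
        · rw [if_neg (by omega), if_pos ⟨rfl, by omega, hb⟩]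
      · by_cases hb0 : b = 0
        · subst hb0
          rw [if_neg (by omega), hC3 k 0, if_pos ⟨rfl, by omega⟩]
        · rw [if_pos ⟨by omega, le_rfl, by omega, hb⟩]
    have H0 : pvGetD2 ((List.range' 1 k).foldl
          (fun ps i => (List.range' 1 ((c.headD []).length - 1)).foldl
            (fun ps j => pvSet2 ps i j
              (pvInd c t i j + pvGetD2 ps (i - 1) j + pvGetD2 ps i (j - 1)
                - pvGetD2 ps (i - 1) (j - 1))) ps) (pvPs3 c t)) (1 + k) 0 =
          pvS c t (1 + k) 0 := by
      rw [ihC (1 + k) 0, if_neg (by omega), hC3 (1 + k) 0, if_pos ⟨rfl, by omega⟩]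
    obtain ⟨innS, innC⟩ := char_inner c t (1 + k) hn hm (by omega) (by omega) _ ihS H1 H0
      ((c.headD []).length - 1) le_rfl
    refine ⟨innS, fun a b => ?_⟩
    rw [innC a b]
    by_cases h : a = 1 + k ∧ 1 ≤ b ∧ b ≤ (c.headD []).length - 1
    · obtain ⟨ha', hb1, hb2⟩ := h
      rw [if_pos ⟨ha', hb1, hb2⟩,
        if_pos (show 1 ≤ a ∧ a ≤ k + 1 ∧ 1 ≤ b ∧ b < (c.headD []).length by omega), ha']
    · rw [if_neg h, ihC a b]
      by_cases h1 : 1 ≤ a ∧ a ≤ k ∧ 1 ≤ b ∧ b < (c.headD []).length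
      · rw [if_pos h1,
          if_pos (show 1 ≤ a ∧ a ≤ k + 1 ∧ 1 ≤ b ∧ b < (c.headD []).length by omega)]
      · rw [if_neg h1,
          if_neg (show ¬(1 ≤ a ∧ a ≤ k + 1 ∧ 1 ≤ b ∧ b < (c.headD []).length) by omega)]

-- the complete characterisation of port A
lemma A_char (c : List (List Int)) (t : Int)
    (hn : 0 < c.length) (hm : 0 < (c.headD []).length) :
    pvShape (fill_prefix_sum c t) c.length (c.headD []).length ∧
    ∀ i < c.length, ∀ j < (c.headD []).length,
      pvGetD2 (fill_prefix_sum c t) i j = pvS c t i j := by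
  rw [fill_eq_stages]
  obtain ⟨hS, hC⟩ := char_outer c t hn hm (c.length - 1) le_rfl
  refine ⟨hS, fun i hin j hjm => ?_⟩
  rw [hC i j]
  by_cases h : 1 ≤ i ∧ 1 ≤ j
  · rw [if_pos ⟨h.1, by omega, h.2, hjm⟩]
  · rw [if_neg (by omega), (char_ps3 c t hn hm).2 i j]
    by_cases hj0 : j = 0
    · subst hj0; rw [if_pos ⟨rfl, hin⟩]
    · have hi0 : i = 0 := by omega
      subst hi0
      rw [if_neg (by omega), if_pos ⟨rfl, by omega, hjm⟩]

-- Characterisation of port B --------------------------------------------------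

-- the list of partial vertical accumulations produced by Source B's second loop
def pvParts (prev : List Int) : List (List Int) → List (List Int)
  | [] => []
  | r :: rs => List.zipWith (· + ·) prev r :: pvParts (List.zipWith (· + ·) prev r) rs

lemma foldB (rows : List (List Int)) :
    ∀ (out : List (List Int)) (prev : List Int),
    (rows.foldl
      (fun (acc : List (List Int) × List Int) row =>
        (acc.1 ++ [List.zipWith (· + ·) acc.2 row], List.zipWith (· + ·) acc.2 row))
      (out, prev)).1 = out ++ pvParts prev rows := by
  induction rows with
  | nil => intro out prev; simp [pvParts]
  | cons r rs ih =>
    intro out prev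
    rw [List.foldl_cons, ih, pvParts]
    simp

lemma alt_eq_parts (c : List (List Int)) (t : Int) :
    fill_prefix_sum_alt c t =
      pvParts (List.replicate (c.headD []).length 0)
        (c.map (fun row =>
          pvScan ((row.take (c.headD []).length).map
            (fun x => if x ≤ t then (1 : Int) else 0)) 0)) := by
  rw [fill_prefix_sum_alt]
  rw [show (fun (acc : List (List Int) × List Int) (row : List Int) =>
      ((acc.1 ++ [List.zipWith (· + ·) acc.2 row], List.zipWith (· + ·) acc.2 row) : List (List Int) × List Int)) =
    (fun acc row =>
      let prev := List.zipWith (· + ·) acc.2 row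
      (acc.1 ++ [prev], prev)) from rfl] at *
  exact (foldB _ _ _).trans (by simp)

lemma pvScan_length (l : List Int) (s : Int) : (pvScan l s).length = l.length := by
  induction l generalizing s with
  | nil => rfl
  | cons x xs ih => simp [pvScan, ih]

lemma pvScan_getD (l : List Int) (s : Int) (k : Nat) (hk : k < l.length) :
    (pvScan l s).getD k 0 = s + ∑ b ∈ Finset.range (k + 1), l.getD b 0 := by
  induction l generalizing s k with
  | nil => simp at hk
  | cons x xs ih =>
    cases k with
    | zero => simp [pvScan, List.getD]
    | succ k =>
      rw [pvScan, List.getD_cons_succ, ih (s + x) k (by simpa using hk)]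
      have hsum : ∑ b ∈ Finset.range (k + 1 + 1), (x :: xs).getD b 0 =
          x + ∑ b ∈ Finset.range (k + 1), xs.getD b 0 := by
        rw [Finset.sum_range_succ']
        simp only [List.getD_cons_succ, List.getD_cons_zero]
        ring
      rw [hsum]
      ring

lemma pvParts_length (prev : List Int) (rows : List (List Int)) :
    (pvParts prev rows).length = rows.length := by
  induction rows generalizing prev with
  | nil => rfl
  | cons r rs ih => simp [pvParts, ih]

lemma pvParts_shape (m : Nat) (prev : List Int) (rows : List (List Int))
    (hp : prev.length = m) (hr : ∀ r ∈ rows, r.length = m) :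
    ∀ a < rows.length, ((pvParts prev rows).getD a []).length = m := by
  induction rows generalizing prev with
  | nil => intro a ha; simp at ha
  | cons r rs ih =>
    intro a ha
    cases a with
    | zero =>
      have : (pvParts prev (r :: rs)).getD 0 [] = List.zipWith (· + ·) prev r := rfl
      rw [this, List.length_zipWith, hp, hr r (by simp)]
      omega
    | succ a =>
      have : (pvParts prev (r :: rs)).getD (a + 1) [] =
          (pvParts (List.zipWith (· + ·) prev r) rs).getD a [] := by
        simp [pvParts, List.getD]
      rw [this]
      refine ih (List.zipWith (· + ·) prev r) ?_ (fun x hx => hr x (by simp [hx])) a (by simpa using ha)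
      rw [List.length_zipWith, hp, hr r (by simp)]
      omega

lemma getD_zipWith_add (l1 l2 : List Int) (b : Nat) (h1 : b < l1.length) (h2 : b < l2.length) :
    (List.zipWith (· + ·) l1 l2).getD b 0 = l1.getD b 0 + l2.getD b 0 := by
  rw [List.getD_eq_getElem _ _ (by rw [List.length_zipWith]; omega),
    List.getD_eq_getElem _ _ h1, List.getD_eq_getElem _ _ h2]
  simp

lemma pvParts_getD (m : Nat) (rows : List (List Int)) :
    ∀ (prev : List Int), prev.length = m → (∀ r ∈ rows, r.length = m) →
    ∀ a < rows.length, ∀ b < m,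
    pvGetD2 (pvParts prev rows) a b =
      prev.getD b 0 + ∑ x ∈ Finset.range (a + 1), (rows.getD x []).getD b 0 := by
  induction rows with
  | nil => intro prev _ _ a ha; simp at ha
  | cons r rs ih =>
    intro prev hp hr a ha b hb
    cases a with
    | zero =>
      have e0 : pvGetD2 (pvParts prev (r :: rs)) 0 b = (List.zipWith (· + ·) prev r).getD b 0 := rfl
      rw [e0, getD_zipWith_add _ _ _ (by omega) (by rw [hr r (by simp)]; omega)]
      simp [List.getD]
    | succ a =>
      have e1 : pvGetD2 (pvParts prev (r :: rs)) (a + 1) b =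
          pvGetD2 (pvParts (List.zipWith (· + ·) prev r) rs) a b := by
        simp [pvParts, pvGetD2, List.getD]
      have hp' : (List.zipWith (· + ·) prev r).length = m := by
        rw [List.length_zipWith, hp, hr r (by simp)]; omega
      rw [e1, ih (List.zipWith (· + ·) prev r) hp' (fun x hx => hr x (by simp [hx])) a
        (by simpa using ha) b hb]
      rw [getD_zipWith_add _ _ _ (by omega) (by rw [hr r (by simp)]; omega)]
      have hsum : ∑ x ∈ Finset.range (a + 1 + 1), ((r :: rs).getD x []).getD b 0 =
          r.getD b 0 + ∑ x ∈ Finset.range (a + 1), (rs.getD x []).getD b 0 := by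
        rw [Finset.sum_range_succ']
        simp only [List.getD_cons_succ, List.getD_cons_zero]
        ring
      rw [hsum]
      ring

-- properties of the indicator rows built by Source B's first pass
lemma rows_mem_length (c : List (List Int)) (t : Int)
    (hrag : ∀ row ∈ c, (c.headD []).length ≤ row.length) :
    ∀ r ∈ c.map (fun row =>
        pvScan ((row.take (c.headD []).length).map
          (fun x => if x ≤ t then (1 : Int) else 0)) 0), r.length = (c.headD []).length := by
  intro r hrmem
  obtain ⟨row, hrow, rfl⟩ := List.mem_map.1 hrmem
  rw [pvScan_length, List.length_map, List.length_take]
  have := hrag row hrow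
  omega

lemma rows_getD (c : List (List Int)) (t : Int)
    (hrag : ∀ row ∈ c, (c.headD []).length ≤ row.length)
    (a : Nat) (ha : a < c.length) (b : Nat) (hb : b < (c.headD []).length) :
    ((c.map (fun row =>
        pvScan ((row.take (c.headD []).length).map
          (fun x => if x ≤ t then (1 : Int) else 0)) 0)).getD a []).getD b 0 =
      ∑ y ∈ Finset.range (b + 1), pvInd c t a y := by
  have hmap : (c.map (fun row =>
        pvScan ((row.take (c.headD []).length).map
          (fun x => if x ≤ t then (1 : Int) else 0)) 0)).getD a [] =
      pvScan (((c.getD a []).take (c.headD []).length).map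
          (fun x => if x ≤ t then (1 : Int) else 0)) 0 := by
    rw [List.getD_eq_getElem _ _ (by simpa using ha), List.getElem_map,
      List.getD_eq_getElem _ _ ha]
  rw [hmap]
  have hlenrow : (c.headD []).length ≤ (c.getD a []).length := by
    refine hrag (c.getD a []) ?_
    rw [List.getD_eq_getElem _ _ ha]
    exact List.getElem_mem _
  have hlen : b < (((c.getD a []).take (c.headD []).length).map
      (fun x => if x ≤ t then (1 : Int) else 0)).length := by
    rw [List.length_map, List.length_take]; omega
  rw [pvScan_getD _ _ _ hlen, zero_add]
  refine Finset.sum_congr rfl (fun y hy => ?_)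
  have hym : y < (c.headD []).length := by
    have := Finset.mem_range.1 hy; omega
  rw [List.getD_eq_getElem _ _ (by rw [List.length_map, List.length_take]; omega),
    List.getElem_map, List.getElem_take]
  simp only [pvInd, pvGetD2]
  have e : (c.getD a []).getD y 0 =
      (c.getD a [])[y]'(show y < (c.getD a []).length by omega) :=
    List.getD_eq_getElem _ _ _
  simp only [e]

-- the complete characterisation of port B
lemma B_char (c : List (List Int)) (t : Int)
    (_hn : 0 < c.length) (_hm : 0 < (c.headD []).length)
    (hrag : ∀ row ∈ c, (c.headD []).length ≤ row.length) :
    pvShape (fill_prefix_sum_alt c t) c.length (c.headD []).length ∧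
    ∀ i < c.length, ∀ j < (c.headD []).length,
      pvGetD2 (fill_prefix_sum_alt c t) i j = pvS c t i j := by
  rw [alt_eq_parts]
  have hr := rows_mem_length c t hrag
  have hrowslen : (c.map (fun row =>
      pvScan ((row.take (c.headD []).length).map
        (fun x => if x ≤ t then (1 : Int) else 0)) 0)).length = c.length := by
    simp
  constructor
  · refine ⟨by rw [pvParts_length, hrowslen], fun a ha => ?_⟩
    exact pvParts_shape _ _ _ (by simp) hr a (by rw [hrowslen]; exact ha)
  · intro i hi j hj
    rw [pvParts_getD (c.headD []).length _ _ (by simp) hr i (by rw [hrowslen]; exact hi) j hj]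
    rw [List.getD_eq_getElem _ _ (by simpa using hj), List.getElem_replicate, zero_add]
    rw [pvS]
    refine Finset.sum_congr rfl (fun x hx => ?_)
    exact rows_getD c t hrag x (by have := Finset.mem_range.1 hx; omega) j hj

-- two tables of the same shape with equal entries are equal
lemma table_ext (P Q : List (List Int)) (n m : Nat)
    (hP : pvShape P n m) (hQ : pvShape Q n m)
    (h : ∀ i < n, ∀ j < m, pvGetD2 P i j = pvGetD2 Q i j) : P = Q := by
  apply List.ext_getElem (by rw [hP.1, hQ.1])
  intro i hiP hiQ
  have hin : i < n := by rw [hP.1] at hiP; exact hiP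
  apply List.ext_getElem
  · have e1 : P[i] = P.getD i [] := (List.getD_eq_getElem _ _ hiP).symm
    have e2 : Q[i] = Q.getD i [] := (List.getD_eq_getElem _ _ hiQ).symm
    rw [e1, e2, hP.2 i hin, hQ.2 i hin]
  · intro j hj1 hj2
    have hjm : j < m := by
      have e1 : P[i] = P.getD i [] := (List.getD_eq_getElem _ _ hiP).symm
      rw [e1, hP.2 i hin] at hj1
      exact hj1
    have := h i hin j hjm
    rw [pvGetD2, pvGetD2, List.getD_eq_getElem _ _ hiP, List.getD_eq_getElem _ _ hiQ] at this
    rw [List.getD_eq_getElem _ _ hj1, List.getD_eq_getElem _ _ hj2] at this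
    exact this

-- ===== VERDICT (by name: the statement is the Claim_ definition above) =====
theorem fill_prefix_sum_spec : Claim_equal_fill_prefix_sum := by
  intro c t _hDom hPre
  obtain ⟨hne, hm, hrag⟩ := hPre
  have hn : 0 < c.length := by
    cases c with
    | nil => exact absurd rfl hne
    | cons r rs => simp
  obtain ⟨hAS, hAC⟩ := A_char c t hn hm
  obtain ⟨hBS, hBC⟩ := B_char c t hn hm hrag
  show fill_prefix_sum c t = fill_prefix_sum_alt c t
  exact table_ext _ _ _ _ hAS hBS
    (fun i hi j hj => (hAC i hi j hj).trans (hBC i hi j hj).symm)
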